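-- pv_equiv track=rewrite | github.com/Jannxnn/SeedLang-V2 | bench/industry/sources/bench_industry.py | state_machine_test
-- ===== SOURCE A (Python) =====
-- def state_machine_test(n):
--     state = 0; count = 0
--     for i in range(n):
--         if state == 0: state = 1 if i % 3 == 0 else 2; count += 1
--         elif state == 1: state = 0 if i % 5 == 0 else 3; count += 2
--         elif state == 2: state = 0 if i % 7 == 0 else 1; count += 3
--         else: state = 0; count += 4
--     return count
-- ===== SOURCE B (Python) =====
-- # Precompute one 105-step period (lcm of 3,5,7) as a cumulative-count table once;
-- # the machine returns to state 0 after each period, so the answer is a table lookup.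
-- _CUM = [0]
-- _s, _t = 0, 0
-- for _i in range(105):
--     _s, _inc = {0: ((1 if _i % 3 == 0 else 2), 1),
--                 1: ((0 if _i % 5 == 0 else 3), 2),
--                 2: ((0 if _i % 7 == 0 else 1), 3),
--                 3: (0, 4)}[_s]
--     _t += _inc
--     _CUM.append(_t)
--
-- def state_machine_test(n):
--     if n <= 0:
--         return 0
--     q, r = divmod(n, 105)
--     return q * _CUM[105] + _CUM[r]
-- ===== Notes on version B (the rewrite author's own statement) =====
-- stated objective: faster
-- what changed: Replaces the O(n) step-by-step simulation by an O(1) lookup in a cumulative-count table precomputed once over the 105-step period (lcm of 3,5,7): the machine is back in state 0 after each period, so the answer is (full periods) * table[105] + table[tail].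
import Mathlib
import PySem

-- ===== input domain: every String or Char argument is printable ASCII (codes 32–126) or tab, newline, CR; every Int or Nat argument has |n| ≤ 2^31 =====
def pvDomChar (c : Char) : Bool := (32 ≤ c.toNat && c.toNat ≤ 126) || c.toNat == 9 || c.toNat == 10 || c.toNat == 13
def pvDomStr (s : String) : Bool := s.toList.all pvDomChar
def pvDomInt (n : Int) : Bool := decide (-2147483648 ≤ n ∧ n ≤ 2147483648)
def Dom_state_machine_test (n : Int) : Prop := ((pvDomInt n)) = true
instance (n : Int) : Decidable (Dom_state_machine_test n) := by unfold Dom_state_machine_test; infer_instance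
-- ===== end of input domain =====

-- B replaces A's O(n) step-by-step simulation by a lookup into a cumulative-count table
-- precomputed once over the 105-step period (lcm of 3,5,7) (measured faster).

-- ===== PORT A =====
-- the loop body of A: one transition of the state machine, on the pair (state, count)
def smStep (sc : Int × Int) (i : Int) : Int × Int :=
  if sc.1 == 0 then ((if PySem.Int.mod i 3 == 0 then 1 else 2), sc.2 + 1)
  else if sc.1 == 1 then ((if PySem.Int.mod i 5 == 0 then 0 else 3), sc.2 + 2)
  else if sc.1 == 2 then ((if PySem.Int.mod i 7 == 0 then 0 else 1), sc.2 + 3)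
  else (0, sc.2 + 4)

def state_machine_test (n : Int) : Int :=
  ((PySem.List.pyRange 0 n 1).foldl smStep (0, 0)).2

-- ===== PORT B =====
-- Source B's dict literal {0: …, 1: …, 2: …, 3: …}[state]: next state and count increment
def bTrans (s : Nat) (i : Int) : Nat × Int :=
  match s with
  | 0 => ((if PySem.Int.mod i 3 == 0 then 1 else 2), 1)
  | 1 => ((if PySem.Int.mod i 5 == 0 then 0 else 3), 2)
  | 2 => ((if PySem.Int.mod i 7 == 0 then 0 else 1), 3)
  | _ => (0, 4)

-- Source B's module-level table loop after k of its 105 iterations: (_CUM, _s, _t)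
def bTable (k : Nat) : List Int × Nat × Int :=
  match k with
  | 0 => ([0], 0, 0)
  | k + 1 =>
    let (cum, s, t) := bTable k
    let (s', inc) := bTrans s (k : Int)
    (cum ++ [t + inc], s', t + inc)

def state_machine_test_alt (n : Int) : Int :=
  if n ≤ 0 then 0
  else
    let cum := (bTable 105).1
    let q := PySem.Int.floordiv n 105
    let r := PySem.Int.mod n 105
    -- _CUM[105] and _CUM[r] with 0 ≤ r < 105 = len(_CUM) - 1: always in range,
    -- so plain in-range indexing (getD default never reached) is exact here
    q * cum.getD 105 0 + cum.getD r.toNat 0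

-- ===== PRECONDITION & SPEC =====
def Spec_state_machine_test (n : Int) (out : Int) : Prop := out = state_machine_test_alt n
instance (n : Int) (out : Int) : Decidable (Spec_state_machine_test n out) := by unfold Spec_state_machine_test; infer_instance

-- ===== CLAIM (what is proved, stated in full; the proofs are below) =====
def Claim_equal_state_machine_test : Prop := ∀ (n : Int), Dom_state_machine_test n → Spec_state_machine_test n (state_machine_test n)

-- ===== LEMMAS AND PROOFS =====

-- smRun lo k sc: fold of smStep over the k indices lo, lo+1, …, lo+k-1
def smRun (lo : Int) (k : Nat) (sc : Int × Int) : Int × Int :=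
  ((List.range k).map (fun j => lo + (j : Int))).foldl smStep sc

theorem smRun_succ (lo : Int) (k : Nat) (sc : Int × Int) :
    smRun lo (k + 1) sc = smStep (smRun lo k sc) (lo + k) := by
  simp [smRun, List.range_succ]

-- B's transition agrees with A's step, with the Nat state cast to Int
theorem bTrans_smStep (s : Nat) (t i : Int) :
    smStep ((s : Int), t) i = (((bTrans s i).1 : Int), t + (bTrans s i).2) := by
  match s with
  | 0 => simp [smStep, bTrans]
  | 1 => simp [smStep, bTrans]
  | 2 => simp [smStep, bTrans]
  | (s + 3) =>
    simp only [smStep, bTrans, beq_iff_eq, Nat.cast_add, Nat.cast_ofNat]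
    rw [if_neg (show ¬((s : Int) + 3 = 0) by omega),
        if_neg (show ¬((s : Int) + 3 = 1) by omega),
        if_neg (show ¬((s : Int) + 3 = 2) by omega)]
    simp

-- invariant of Source B's table loop: the list is the prefix-count table and (s, t) track A's run
theorem bTable_spec (k : Nat) :
    (bTable k).1 = (List.range (k + 1)).map (fun j => (smRun 0 j (0, 0)).2) ∧
    ((((bTable k).2.1 : Nat) : Int), (bTable k).2.2) = smRun 0 k (0, 0) := by
  induction k with
  | zero => simp [bTable, smRun]
  | succ k ih =>
    obtain ⟨hc, hst⟩ := ih
    constructor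
    · show (bTable k).1 ++ [(bTable k).2.2 + (bTrans (bTable k).2.1 (k : Int)).2] = _
      rw [hc, List.range_succ (n := k + 1), List.map_append]
      congr 1
      simp only [List.map_cons, List.map_nil]
      congr 1
      rw [smRun_succ, ← hst, bTrans_smStep]
      simp
    · show ((((bTrans (bTable k).2.1 (k : Int)).1 : Nat) : Int),
            (bTable k).2.2 + (bTrans (bTable k).2.1 (k : Int)).2) = _
      rw [smRun_succ, ← hst, bTrans_smStep]
      simp

theorem bTable_getD (k j : Nat) (hj : j ≤ k) :
    (bTable k).1.getD j 0 = (smRun 0 j (0, 0)).2 := by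
  rw [(bTable_spec k).1]
  rw [List.getD_eq_getElem?_getD]
  simp [Nat.lt_succ_of_le hj]

-- the count component is a pure accumulator: shifting it shifts the result
theorem smRun_shift (k : Nat) (lo : Int) (s c : Int) :
    smRun lo k (s, c) = ((smRun lo k (s, 0)).1, (smRun lo k (s, 0)).2 + c) := by
  induction k with
  | zero => simp [smRun]
  | succ k ih =>
    rw [smRun_succ, smRun_succ, ih]
    rcases smRun lo k (s, 0) with ⟨s', c'⟩
    simp only [smStep]
    split_ifs <;> simp <;> ring

-- one transition depends on the index only through its residue mod 105
theorem smStep_period (sc : Int × Int) (i : Int) : smStep sc (i + 105) = smStep sc i := by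
  have d3 : (3 ∣ (i + 105)) ↔ (3 ∣ i) := by omega
  have d5 : (5 ∣ (i + 105)) ↔ (5 ∣ i) := by omega
  have d7 : (7 ∣ (i + 105)) ↔ (7 ∣ i) := by omega
  simp [smStep, d3, d5, d7]

theorem smRun_period (k : Nat) (lo : Int) (sc : Int × Int) :
    smRun (lo + 105) k sc = smRun lo k sc := by
  induction k with
  | zero => rfl
  | succ k ih =>
    rw [smRun_succ, smRun_succ, ih]
    have h : lo + 105 + (k : Int) = (lo + k) + 105 := by ring
    rw [h, smStep_period]

theorem smRun_add (k1 k2 : Nat) (lo : Int) (sc : Int × Int) :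
    smRun lo (k1 + k2) sc = smRun (lo + k1) k2 (smRun lo k1 sc) := by
  induction k2 with
  | zero => rfl
  | succ k ih =>
    have h : k1 + (k + 1) = (k1 + k) + 1 := by ring
    rw [h, smRun_succ, smRun_succ, ih]
    congr 1
    push_cast
    ring

set_option maxRecDepth 4000 in
theorem smRun_block : smRun 0 105 (0, 0) = (0, 237) := by decide

-- the closed form: q full blocks of 237 plus the tail of r steps
theorem smRun_closed (q r : Nat) :
    (smRun 0 (105 * q + r) (0, 0)).2 = q * 237 + (smRun 0 r (0, 0)).2 := by
  induction q with
  | zero => simp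
  | succ q ih =>
    have hk : 105 * (q + 1) + r = 105 + (105 * q + r) := by ring
    rw [hk, smRun_add 105 (105 * q + r) 0 (0, 0), smRun_block]
    have hp : (0 : Int) + (105 : Nat) = (0 : Int) + 105 := by norm_num
    rw [hp, smRun_period, smRun_shift (105 * q + r) 0 0 237, ih]
    push_cast
    ring

theorem state_machine_test_eq_smRun (n : Int) :
    state_machine_test n = (smRun 0 n.toNat (0, 0)).2 := by
  unfold state_machine_test smRun
  rw [PySem.List.pyRange_one, Int.sub_zero]
  simp
  simp only [← List.map_eq_flatMap]

-- ===== VERDICT (by name: the statement is the Claim_ definition above) =====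
theorem state_machine_test_spec : Claim_equal_state_machine_test := by
  intro n _
  unfold Spec_state_machine_test state_machine_test_alt
  rw [state_machine_test_eq_smRun]
  by_cases hn : n ≤ 0
  · simp only [hn, if_pos]
    have h0 : n.toNat = 0 := by omega
    rw [h0]
    simp [smRun]
  · simp only [hn, if_neg, not_false_iff]
    set q : Int := PySem.Int.floordiv n 105 with hq
    set r : Int := PySem.Int.mod n 105 with hr
    have hqe : q = n / 105 := by rw [hq, PySem.Int.floordiv_eq_ediv_of_pos (by norm_num)]
    have hre : r = n % 105 := by rw [hr, PySem.Int.mod_eq_emod_of_pos (by norm_num)]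
    have hq0 : 0 ≤ q := by rw [hqe]; omega
    have hr0 : 0 ≤ r := by rw [hre]; omega
    have hrlt : r < 105 := by rw [hre]; omega
    have hsplit : n.toNat = 105 * q.toNat + r.toNat := by rw [hqe, hre]; omega
    rw [hsplit, smRun_closed q.toNat r.toNat]
    rw [bTable_getD 105 105 (by norm_num), bTable_getD 105 r.toNat (by omega), smRun_block]
    have hc : ((q.toNat : Int)) = q := Int.toNat_of_nonneg hq0
    push_cast [hc]
    ring
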